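-- pv_equiv track=rewrite | github.com/aymadr/Mail-Analyzer | mail-security-tool/backend/email_parser.py | _extract_header_block_from_blob
-- ===== SOURCE A (Python) =====
-- def _extract_header_block_from_blob(blob: str) -> str:
--     """Extrait un bloc de headers RFC822 depuis un texte brut/bytes décodés."""
--     cleaned = (blob or "").replace("\x00", "")
--
--     start_positions = []
--     for marker in ["Received:", "From:", "To:", "Subject:", "Date:"]:
--         idx = cleaned.find(marker)
--         if idx >= 0:
--             start_positions.append(idx)
--
--     if not start_positions:
--         return ""
--
--     start = min(start_positions)
--     candidate = cleaned[start: start + 100000]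
--     if "\n\n" in candidate:
--         candidate = candidate.split("\n\n", 1)[0]
--
--     return candidate
-- ===== SOURCE B (Python) =====
-- def _extract_header_block_from_blob(blob: str) -> str:
--     """Extrait un bloc de headers RFC822 depuis un texte brut/bytes decodes."""
--     cleaned = (blob or "").replace("\x00", "")
--     markers = ("Received:", "From:", "To:", "Subject:", "Date:")
--     start = next((i for i in range(len(cleaned)) if cleaned.startswith(markers, i)), -1)
--     if start < 0:
--         return ""
--     return cleaned[start:start + 100000].split("\n\n", 1)[0]
-- ===== Notes on version B (the rewrite author's own statement) =====
-- stated objective: alternative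
-- what changed: Replaces the five separate str.find scans plus min() with a single left-to-right scan that returns the first position where any of the five markers starts, and drops the redundant '\n\n' membership test before the split.
import Mathlib
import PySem

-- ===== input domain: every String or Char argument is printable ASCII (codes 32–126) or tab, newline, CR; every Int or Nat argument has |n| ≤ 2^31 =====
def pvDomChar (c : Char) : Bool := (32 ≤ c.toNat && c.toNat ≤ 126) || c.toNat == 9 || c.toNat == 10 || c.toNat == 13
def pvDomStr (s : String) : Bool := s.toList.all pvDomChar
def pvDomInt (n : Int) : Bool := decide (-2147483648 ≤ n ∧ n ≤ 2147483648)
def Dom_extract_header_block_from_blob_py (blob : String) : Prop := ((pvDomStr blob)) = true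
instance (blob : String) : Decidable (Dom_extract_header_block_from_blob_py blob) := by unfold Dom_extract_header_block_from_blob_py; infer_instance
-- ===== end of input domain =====

-- B replaces A's five whole-string find passes plus min() by one left-to-right scan that stops at
-- the first position where any marker starts (alternative decomposition, same asymptotic cost).

-- ===== PORT A =====
def pvMarkersA : List (List Char) :=
  ["Received:".toList, "From:".toList, "To:".toList, "Subject:".toList, "Date:".toList]

def extract_header_block_from_blob_py (blob : String) : String :=
  let cleaned := PySem.Chars.replace blob.toList ['\x00'] []
  let start_positions := pvMarkersA.foldl
    (fun acc marker =>
      let idx := PySem.Chars.find cleaned marker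
      if 0 ≤ idx then acc ++ [idx] else acc) []
  if start_positions = [] then ""
  else
    -- min(start_positions); start_positions ≠ [] on this branch, so min? is some and getD never falls back
    let start := (PySem.List.min? start_positions id).getD 0
    let candidate := PySem.List.slice cleaned (some start) (some (start + 100000))
    -- candidate.split("\n\n", 1)[0] on the branch where "\n\n" in candidate: the characters
    -- before the first occurrence of "\n\n" (exact: find ≥ 0 here; PySem has no maxsplit split)
    let candidate :=
      if PySem.Chars.isIn ['\n', '\n'] candidate then
        List.take (PySem.Chars.find candidate ['\n', '\n']).toNat candidate
      else candidate
    String.ofList candidate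

-- ===== PORT B =====
def pvMarkersB : List (List Char) :=
  ["Received:".toList, "From:".toList, "To:".toList, "Subject:".toList, "Date:".toList]

-- candidate.split("\n\n", 1)[0]: the whole string if "\n\n" does not occur (find = -1),
-- else the characters before the first occurrence (exact port; PySem has no maxsplit split)
def pvCutAtBlank (cand : List Char) : List Char :=
  let f := PySem.Chars.find cand ['\n', '\n']
  if f = -1 then cand else List.take f.toNat cand

def extract_header_block_from_blob_py_alt (blob : String) : String :=
  let cleaned := PySem.Chars.replace blob.toList ['\x00'] []
  -- next((i for i in range(len(cleaned)) if cleaned.startswith(markers, i)), -1)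
  match (List.range cleaned.length).find?
      (fun i => pvMarkersB.any (fun m => PySem.Chars.startswith (List.drop i cleaned) m)) with
  | none => ""
  | some start =>
    String.ofList (pvCutAtBlank
      (PySem.List.slice cleaned (some (start : Int)) (some ((start : Int) + 100000))))

-- ===== PRECONDITION & SPEC =====
def Spec_extract_header_block_from_blob_py (blob : String) (out : String) : Prop := out = extract_header_block_from_blob_py_alt blob
instance (blob : String) (out : String) : Decidable (Spec_extract_header_block_from_blob_py blob out) := by unfold Spec_extract_header_block_from_blob_py; infer_instance

-- ===== CLAIM (what is proved, stated in full; the proofs are below) =====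
def Claim_equal_extract_header_block_from_blob_py : Prop := ∀ (blob : String), Dom_extract_header_block_from_blob_py blob → Spec_extract_header_block_from_blob_py blob (extract_header_block_from_blob_py blob)

-- ===== LEMMAS AND PROOFS =====

-- A's accumulated list of the non-negative find results, as a filter-map
theorem pvMarkersB_eq_A : pvMarkersB = pvMarkersA := rfl

theorem pv_pos_eq (cs : List Char) :
    pvMarkersA.foldl
      (fun acc marker =>
        if 0 ≤ PySem.Chars.find cs marker then acc ++ [PySem.Chars.find cs marker] else acc) [] =
    (pvMarkersA.filter (fun m => decide (0 ≤ PySem.Chars.find cs m))).map (PySem.Chars.find cs) := by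
  have h := PySem.List.foldl_append_if
    (fun m => decide (0 ≤ PySem.Chars.find cs m)) (PySem.Chars.find cs) pvMarkersA []
  simpa [decide_eq_true_eq] using h

-- the two tail computations (A's guarded split, B's pvCutAtBlank) agree
theorem pv_cut_eq (cand : List Char) :
    (if PySem.Chars.isIn ['\n', '\n'] cand then
        List.take (PySem.Chars.find cand ['\n', '\n']).toNat cand
      else cand) = pvCutAtBlank cand := by
  unfold pvCutAtBlank
  by_cases h : PySem.Chars.isIn ['\n', '\n'] cand = true
  · have hf : PySem.Chars.find cand ['\n', '\n'] ≠ -1 :=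
      (PySem.Chars.find_ne_neg_one_iff _ _).mpr ((PySem.Chars.isIn_iff_infix _ _).mp h)
    simp [h, hf]
  · have hf : PySem.Chars.find cand ['\n', '\n'] = -1 :=
      (PySem.Chars.find_eq_neg_one_iff _ _).mpr
        ((PySem.Chars.isIn_eq_false_iff _ _).mp (Bool.eq_false_iff.mpr (by simpa using h)))
    simp [h, hf]

-- a marker starting at position i means this marker occurs, i.e. its find is non-negative
theorem pv_find_nonneg_of_prefix {cs m : List Char} {i : Nat} (h : m <+: List.drop i cs) :
    0 ≤ PySem.Chars.find cs m := by
  exact (PySem.Chars.find_nonneg_iff _ _).mpr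
    ((PySem.Chars.isIn_iff_infix _ _).mp
      ((PySem.Chars.exists_prefix_drop_iff_isIn m cs).mp ⟨i, h⟩))
-- ===== VERDICT (the statement is the Claim_ definition above) =====
theorem extract_header_block_from_blob_py_spec : Claim_equal_extract_header_block_from_blob_py := by
  intro blob _
  unfold Spec_extract_header_block_from_blob_py
  simp only [extract_header_block_from_blob_py, extract_header_block_from_blob_py_alt,
    pvMarkersB_eq_A]
  set cs := PySem.Chars.replace blob.toList ['\x00'] [] with hcs
  rw [pv_pos_eq cs]
  set P : List Int :=
    (pvMarkersA.filter (fun m => decide (0 ≤ PySem.Chars.find cs m))).map (PySem.Chars.find cs)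
    with hPdef
  have hmem : ∀ x : Int, x ∈ P ↔
      ∃ m ∈ pvMarkersA, 0 ≤ PySem.Chars.find cs m ∧ PySem.Chars.find cs m = x := by
    intro x
    simp [hPdef, List.mem_map, List.mem_filter, and_assoc]
  have hMne : ∀ m ∈ pvMarkersA, m ≠ [] := by decide
  by_cases hocc : ∀ m ∈ pvMarkersA, PySem.Chars.find cs m = -1
  · -- no marker occurs: both sides return ""
    have hP0 : P = [] := by
      rcases hh : P with _ | ⟨x, xs⟩
      · rfl
      · exfalso
        have hx : x ∈ P := by rw [hh]; exact List.mem_cons_self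
        rcases (hmem x).mp hx with ⟨m, hmM, hge, _⟩
        have := hocc m hmM
        omega
    have hfindnone :
        (List.range cs.length).find?
          (fun i => pvMarkersA.any (fun m => PySem.Chars.startswith (List.drop i cs) m)) = none := by
      rw [List.find?_eq_none]
      intro i _ hp
      rcases List.any_eq_true.mp hp with ⟨m, hmM, hsw⟩
      have hpre : m <+: List.drop i cs := (PySem.Chars.startswith_iff _ _).mp hsw
      have h0 := pv_find_nonneg_of_prefix hpre
      have := hocc m hmM
      omega
    rw [hP0, hfindnone]
    simp
  · -- some marker occurs
    push Not at hocc
    rcases hocc with ⟨m₁, hm₁M, hm₁⟩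
    have hm₁0 : 0 ≤ PySem.Chars.find cs m₁ := by
      have := PySem.Chars.neg_one_le_find cs m₁
      omega
    have hPne : P ≠ [] := by
      intro h0
      have : PySem.Chars.find cs m₁ ∈ P := (hmem _).mpr ⟨m₁, hm₁M, hm₁0, rfl⟩
      rw [h0] at this
      exact absurd this (List.not_mem_nil)
    rcases hmino : PySem.List.min? P id with _ | s
    · exact absurd ((PySem.List.min?_eq_none_iff P id).mp hmino) hPne
    have hsmem : s ∈ P := PySem.List.min?_mem hmino
    have hsle : ∀ x ∈ P, s ≤ x := by
      intro x hx
      exact PySem.List.min?_isMin hmino x hx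
    rcases (hmem s).mp hsmem with ⟨m₀, hm₀M, hm₀0, hm₀s⟩
    have hs0 : (0 : Int) ≤ s := hm₀s ▸ hm₀0
    -- the marker m₀ really starts at position s.toNat
    have hpre₀ : m₀ <+: List.drop s.toNat cs := by
      have h := (PySem.Chars.find_spec (s := cs) (sub := m₀) hm₀0).1
      rwa [hm₀s] at h
    -- B's scan stops exactly at s.toNat
    have hfindsome :
        (List.range cs.length).find?
          (fun i => pvMarkersA.any (fun m => PySem.Chars.startswith (List.drop i cs) m))
          = some s.toNat := by
      rw [List.find?_range_eq_some]
      refine ⟨?_, ?_, ?_⟩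
      · exact List.any_eq_true.mpr ⟨m₀, hm₀M, (PySem.Chars.startswith_iff _ _).mpr hpre₀⟩
      · -- s.toNat < cs.length since the nonempty marker m₀ is a prefix of cs.drop s.toNat
        rw [List.mem_range]
        by_contra hge
        push Not at hge
        have hdrop : List.drop s.toNat cs = [] := List.drop_eq_nil_of_le hge
        rw [hdrop] at hpre₀
        exact hMne m₀ hm₀M (List.prefix_nil.mp hpre₀)
      · intro j hj
        rw [Bool.not_eq_true', List.any_eq_false]
        intro m hmM hsw
        have hpre : m <+: List.drop j cs := (PySem.Chars.startswith_iff _ _).mp hsw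
        have h0 : 0 ≤ PySem.Chars.find cs m := pv_find_nonneg_of_prefix hpre
        have hle : s ≤ PySem.Chars.find cs m := hsle _ ((hmem _).mpr ⟨m, hmM, h0, rfl⟩)
        -- find points to the first occurrence, so find cs m ≤ j
        have hmin := (PySem.Chars.find_spec (s := cs) (sub := m) h0).2
        have hfj : (PySem.Chars.find cs m).toNat ≤ j := by
          by_contra hgt
          push Not at hgt
          exact hmin j hgt hpre
        omega
    rw [if_neg hPne, hfindsome]
    simp only [Option.getD_some]
    have hcast : ((s.toNat : Int)) = s := Int.toNat_of_nonneg hs0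
    rw [hcast, pv_cut_eq]
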